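-- pv_equiv track=rewrite | github.com/rapidsai/cudf | python/cudf/cudf/core/buffer.py | is_c_contiguous
-- ===== SOURCE A (Python) =====
-- from typing import (
--     Any,
--     Dict,
--     List,
--     Mapping,
--     Protocol,
--     Sequence,
--     Tuple,
--     Union,
--     runtime_checkable,
-- )
--
-- def is_c_contiguous(
--     shape: Sequence[int], strides: Sequence[int], itemsize: int
-- ) -> bool:
--     """
--     Determine if shape and strides are C-contiguous
--
--     Parameters
--     ----------
--     shape : Sequence[int]
--         Number of elements in each dimension.
--     strides : Sequence[int]
--         The stride of each dimension in bytes.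
--     itemsize : int
--         Size of an element in bytes.
--
--     Return
--     ------
--     bool
--         The boolean answer.
--     """
--
--     if any(dim == 0 for dim in shape):
--         return True
--     cumulative_stride = itemsize
--     for dim, stride in zip(reversed(shape), reversed(strides)):
--         if dim > 1 and stride != cumulative_stride:
--             return False
--         cumulative_stride *= dim
--     return True
-- ===== SOURCE B (Python) =====
-- def is_c_contiguous(shape, strides, itemsize):
--     # Different algorithm: instead of comparing each stride to a running
--     # expected stride, chain ratios between consecutive significant dims
--     # (dim > 1): each checked stride must equal the next checked stride times
--     # the product of the dims between them, and the last checked stride must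
--     # equal itemsize times the product of the trailing dims.
--     if any(dim == 0 for dim in shape):
--         return True
--     k = min(len(shape), len(strides))
--     dims = shape[len(shape) - k:]
--     strs = strides[len(strides) - k:]
--     prev = None   # stride of the previous significant dim
--     seg = 1       # product of dims since that dim (exclusive)
--     for d, s in zip(dims, strs):
--         if d > 1:
--             if prev is not None and prev != s * (seg * d):
--                 return False
--             prev = s
--             seg = 1
--         else:
--             seg *= d
--     if prev is not None:
--         return prev == itemsize * seg
--     return True
-- ===== Notes on version B (the rewrite author's own statement) =====
-- stated objective: alternative
-- what changed: Replaces A's reversed fold with a running expected-stride accumulator by a forward pass that chains stride ratios: each stride at a dim > 1 must equal the next significant stride times the product of the intervening dims, with a single itemsize anchor at the last significant dim; no expected-stride values are ever computed.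
import Mathlib
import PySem

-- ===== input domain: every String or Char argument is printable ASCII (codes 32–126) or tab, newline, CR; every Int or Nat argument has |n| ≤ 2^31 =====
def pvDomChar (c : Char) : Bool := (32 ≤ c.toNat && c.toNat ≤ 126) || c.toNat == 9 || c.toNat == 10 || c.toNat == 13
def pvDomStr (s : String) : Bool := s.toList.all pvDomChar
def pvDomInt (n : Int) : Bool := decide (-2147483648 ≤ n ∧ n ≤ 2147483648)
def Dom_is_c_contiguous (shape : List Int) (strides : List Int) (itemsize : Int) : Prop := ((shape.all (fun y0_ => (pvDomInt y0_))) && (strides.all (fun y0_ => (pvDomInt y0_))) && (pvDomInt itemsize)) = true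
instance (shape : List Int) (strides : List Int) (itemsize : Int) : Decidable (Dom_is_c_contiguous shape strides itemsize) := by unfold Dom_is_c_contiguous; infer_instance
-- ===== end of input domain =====

-- B chains stride ratios between consecutive dims > 1 (plus one itemsize anchor at the last one) instead of A's reversed fold with a running expected stride; same values on all inputs (equivalent, no speed claim).
-- ===== PORT A =====
-- A's for-loop over zip(reversed(shape), reversed(strides)): state cumulative_stride, early return False
def pvAGo : List (Int × Int) → Int → Bool
  | [], _ => true
  | (dim, stride) :: rest, cum =>
    if dim > 1 && stride != cum then false else pvAGo rest (cum * dim)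

def is_c_contiguous (shape : List Int) (strides : List Int) (itemsize : Int) : Bool :=
  if shape.any (fun dim => dim == 0) then true
  else pvAGo (shape.reverse.zip strides.reverse) itemsize

-- ===== PORT B =====
-- B's forward loop: state prev (stride of previous dim > 1, if any) and seg (product of
-- dims since it); final anchor check prev == itemsize * seg
def pvBGo : List (Int × Int) → Option Int → Int → Int → Bool
  | [], prev, seg, itemsize =>
    match prev with
    | none => true
    | some p => p == itemsize * seg
  | (d, s) :: rest, prev, seg, itemsize =>
    if d > 1 then
      match prev with
      | some p =>
        if p != s * (seg * d) then false else pvBGo rest (some s) 1 itemsize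
      | none => pvBGo rest (some s) 1 itemsize
    else pvBGo rest prev (seg * d) itemsize

def is_c_contiguous_alt (shape : List Int) (strides : List Int) (itemsize : Int) : Bool :=
  if shape.any (fun dim => dim == 0) then true
  else
    let k := min shape.length strides.length
    let dims := shape.drop (shape.length - k)
    let strs := strides.drop (strides.length - k)
    pvBGo (dims.zip strs) none 1 itemsize

-- ===== PRECONDITION & SPEC =====
def Spec_is_c_contiguous (shape : List Int) (strides : List Int) (itemsize : Int) (out : Bool) : Prop := out = is_c_contiguous_alt shape strides itemsize
instance (shape : List Int) (strides : List Int) (itemsize : Int) (out : Bool) : Decidable (Spec_is_c_contiguous shape strides itemsize out) := by unfold Spec_is_c_contiguous; infer_instance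

-- ===== CLAIM (what is proved, stated in full; the proofs are below) =====
def Claim_equal_is_c_contiguous : Prop := ∀ (shape : List Int) (strides : List Int) (itemsize : Int), Dom_is_c_contiguous shape strides itemsize → Spec_is_c_contiguous shape strides itemsize (is_c_contiguous shape strides itemsize)

-- ===== LEMMAS AND PROOFS =====

-- product of the dim components of a pair list
def pvProdDims (l : List (Int × Int)) : Int := (l.map Prod.fst).prod

-- reference predicate: every stride at a dim > 1 equals c times the product of the dims after it
def pvChk : List (Int × Int) → Int → Bool
  | [], _ => true
  | (d, s) :: rest, c => (!(d > 1) || s == c * pvProdDims rest) && pvChk rest c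

-- A's loop over l ++ [(d,s)]: process l first, then the last pair with cum = c * prod(dims l)
theorem pvAGo_append (l : List (Int × Int)) (d s c : Int) :
    pvAGo (l ++ [(d, s)]) c
      = (pvAGo l c && !(d > 1 && s != c * pvProdDims l)) := by
  induction l generalizing c with
  | nil =>
    simp only [List.nil_append, pvAGo, pvProdDims, List.map_nil, List.prod_nil, mul_one,
      Bool.true_and]
    by_cases h : (d > 1 && s != c)
    · simp [h]
    · simp [h]
  | cons p l' ih =>
    obtain ⟨d0, s0⟩ := p
    by_cases h : (d0 > 1 && s0 != c)
    · simp [pvAGo, h]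
    · simp only [List.cons_append, pvAGo, h, if_false, Bool.false_eq_true, ih,
        pvProdDims, List.map_cons, List.prod_cons]
      ring_nf

-- A's loop on the reversed list = the reference predicate
theorem pvAGo_reverse_eq_chk (L : List (Int × Int)) (c : Int) :
    pvAGo L.reverse c = pvChk L c := by
  induction L with
  | nil => simp [pvAGo, pvChk]
  | cons p rest ih =>
    obtain ⟨d, s⟩ := p
    rw [List.reverse_cons, pvAGo_append, ih]
    have hprod : pvProdDims rest.reverse = pvProdDims rest := by
      simp [pvProdDims, List.map_reverse, List.prod_reverse]
    rw [hprod]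
    simp only [pvChk]
    by_cases h1 : (1 : Int) < d
    · simp [h1, bne, Bool.and_comm]
    · simp [h1, Bool.and_comm]

-- B's chained loop = (pending anchor check) && the reference predicate
theorem pvBGo_eq_chk (L : List (Int × Int)) (prev : Option Int) (seg c : Int) :
    pvBGo L prev seg c
      = ((match prev with
          | none => true
          | some p => p == c * seg * pvProdDims L) && pvChk L c) := by
  induction L generalizing prev seg with
  | nil =>
    cases prev with
    | none => simp [pvBGo, pvChk]
    | some p => simp [pvBGo, pvChk, pvProdDims]
  | cons q rest ih =>
    obtain ⟨d, s⟩ := q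
    by_cases hd : (1 : Int) < d
    · cases prev with
      | none =>
        simp only [pvBGo, if_pos hd, ih, pvChk, pvProdDims]
        by_cases h2 : s = c * (rest.map Prod.fst).prod
        · simp [hd]
        · simp [hd, h2]
      | some p =>
        simp only [pvBGo, if_pos hd, ih, pvChk, pvProdDims, List.map_cons, List.prod_cons]
        by_cases h2 : s = c * (rest.map Prod.fst).prod
        · by_cases h3 : p = s * (seg * d)
          · have h4 : p = c * seg * (d * (rest.map Prod.fst).prod) := by rw [h3, h2]; ring
            simp only [bne, h3, h2]
            simp [hd, mul_comm, mul_assoc, mul_left_comm]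
          · rw [h2] at h3
            have h4 : ¬ p = c * seg * (d * (rest.map Prod.fst).prod) := by
              intro hp; apply h3; rw [hp]; ring
            simp [hd, h2, h3, h4, bne]
        · by_cases h3 : p = s * (seg * d)
          · simp [hd, h2, h3, bne]
          · simp [hd, h2, h3, bne]
    · simp only [pvBGo, if_neg hd, ih, pvChk, pvProdDims, List.map_cons, List.prod_cons]
      have he : c * (seg * d) * (rest.map Prod.fst).prod
          = c * seg * (d * (rest.map Prod.fst).prod) := by ring
      cases prev with
      | none => simp [hd]
      | some p => simp [hd, he]

-- zip commutes with reverse for equal-length lists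
theorem pvZipRev (a b : List Int) (h : a.length = b.length) :
    (a.zip b).reverse = a.reverse.zip b.reverse := by
  induction a generalizing b with
  | nil => cases b with
    | nil => simp
    | cons y b' => simp at h
  | cons x a' ih =>
    cases b with
    | nil => simp at h
    | cons y b' =>
      simp only [List.length_cons, Nat.add_right_cancel_iff] at h
      simp only [List.zip_cons_cons, List.reverse_cons, ih b' h]
      rw [List.zip_append (by simp [h])]
      simp

-- zip of the reversed lists = reverse of the zip of the tail-aligned truncations
theorem zip_reverse_eq (a b : List Int) :
    a.reverse.zip b.reverse
      = ((a.drop (a.length - min a.length b.length)).zip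
          (b.drop (b.length - min a.length b.length))).reverse := by
  rw [pvZipRev _ _ (by simp [List.length_drop]; omega)]
  rw [← List.take_reverse, ← List.take_reverse]
  conv_lhs => rw [List.zip_eq_zip_take_min]
  simp [List.length_reverse]

theorem is_c_contiguous_eq (shape strides : List Int) (itemsize : Int) :
    is_c_contiguous shape strides itemsize = is_c_contiguous_alt shape strides itemsize := by
  unfold is_c_contiguous is_c_contiguous_alt
  by_cases hz : shape.any (fun dim => dim == 0)
  · simp [hz]
  · simp only [hz, if_false, Bool.false_eq_true]
    rw [zip_reverse_eq shape strides, pvAGo_reverse_eq_chk, pvBGo_eq_chk]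
    simp

-- ===== VERDICT (by name: the statement is the Claim_ definition above) =====
theorem is_c_contiguous_spec : Claim_equal_is_c_contiguous := by
  intro shape strides itemsize _
  unfold Spec_is_c_contiguous
  exact is_c_contiguous_eq shape strides itemsize
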